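-- pv_equiv track=rewrite | github.com/jeff-donovan/aoc-2024 | 12/12.2.py | make_plant_plot_mapping
-- ===== SOURCE A (Python) =====
-- def make_plant_plot_mapping(garden):
--     plant_plot_mapping = {}
--     for i in range(len(garden)):
--         for j in range(len(garden[i])):
--             plant_type = garden[i][j]
--             if plant_type not in plant_plot_mapping:
--                 plant_plot_mapping[plant_type] = set([])
--             plant_plot_mapping[plant_type].add((i, j))
--     return plant_plot_mapping
-- ===== SOURCE B (Python) =====
-- def make_plant_plot_mapping(garden):
--     cells = [(plant, (i, j)) for i, row in enumerate(garden) for j, plant in enumerate(row)]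
--     plant_types = list(dict.fromkeys(plant for plant, _ in cells))
--     return {t: {coord for plant, coord in cells if plant == t} for t in plant_types}
-- ===== Notes on version B (the rewrite author's own statement) =====
-- stated objective: alternative
-- what changed: Replaces the incremental dict-of-sets accumulation over nested index loops with a flatten/dedup/group pipeline: flatten the grid into (plant, coord) cells, list the distinct plant types in first-appearance order, then build each group by a per-type filter comprehension.
import Mathlib
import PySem

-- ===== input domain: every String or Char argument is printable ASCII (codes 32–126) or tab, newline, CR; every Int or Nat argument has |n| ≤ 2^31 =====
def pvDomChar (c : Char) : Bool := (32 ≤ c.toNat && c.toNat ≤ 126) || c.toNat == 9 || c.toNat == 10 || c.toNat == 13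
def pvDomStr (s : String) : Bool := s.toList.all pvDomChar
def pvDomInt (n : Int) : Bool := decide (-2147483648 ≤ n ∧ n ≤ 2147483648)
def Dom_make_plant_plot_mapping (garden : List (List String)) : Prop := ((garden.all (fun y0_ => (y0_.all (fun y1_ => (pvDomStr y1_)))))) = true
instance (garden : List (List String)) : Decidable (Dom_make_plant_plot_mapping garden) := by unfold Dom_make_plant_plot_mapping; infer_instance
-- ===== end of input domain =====

-- B replaces A's incremental dict-of-sets accumulation with a flatten/dedup/group pipeline
-- (alternative decomposition, same return value; no claim of speed).

-- ===== PORT A =====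
-- literal transliteration of A's nested index loops mutating a dict of sets
def make_plant_plot_mapping (garden : List (List String)) : List (String × List (Int × Int)) :=
  ((PySem.List.pyRange 0 (PySem.List.len garden)).foldl (fun d i =>
    (PySem.List.pyRange 0 (PySem.List.len (PySem.List.pyGetD garden i []))).foldl (fun d j =>
      let plant_type := PySem.List.pyGetD (PySem.List.pyGetD garden i []) j ""
      let d := if d.contains plant_type then d else d.insert plant_type PySem.Set.empty
      -- plant_plot_mapping[plant_type].add((i, j))  (read the set at the key, add, store back)
      d.modify plant_type PySem.Set.empty (fun s => PySem.Set.add s (i, j))) d)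
    PySem.Dict.empty).items

-- ===== PORT B =====
-- literal transliteration of Source B: flatten, dedup the plant types, group by a per-type filter
def make_plant_plot_mapping_alt (garden : List (List String)) : List (String × List (Int × Int)) :=
  let cells := (PySem.List.enumerate garden).flatMap (fun ir =>
    (PySem.List.enumerate ir.2).map (fun jp => (jp.2, (ir.1, jp.1))))
  let plant_types := PySem.List.dedup (cells.map (fun pc => pc.1))
  plant_types.map (fun t =>
    (t, PySem.Set.ofList ((cells.filter (fun pc => pc.1 == t)).map (fun pc => pc.2))))

-- ===== PRECONDITION & SPEC =====
def Spec_make_plant_plot_mapping (garden : List (List String)) (out : List (String × List (Int × Int))) : Prop := out = make_plant_plot_mapping_alt garden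
instance (garden : List (List String)) (out : List (String × List (Int × Int))) : Decidable (Spec_make_plant_plot_mapping garden out) := by unfold Spec_make_plant_plot_mapping; infer_instance

-- ===== CLAIM (what is proved, stated in full; the proofs are below) =====
def Claim_equal_make_plant_plot_mapping : Prop := ∀ (garden : List (List String)), Dom_make_plant_plot_mapping garden → Spec_make_plant_plot_mapping garden (make_plant_plot_mapping garden)

-- ===== LEMMAS AND PROOFS =====

-- A's loop body as a function of one flattened cell (plant type, coordinate)
def pvStep (d : PySem.Dict String (PySem.Set (Int × Int))) (pc : String × (Int × Int)) :
    PySem.Dict String (PySem.Set (Int × Int)) :=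
  let d := if d.contains pc.1 then d else d.insert pc.1 PySem.Set.empty
  d.modify pc.1 PySem.Set.empty (fun s => PySem.Set.add s pc.2)

-- B's grouping expressed over an arbitrary cell list
def pvGroup (cells : List (String × (Int × Int))) : List (String × List (Int × Int)) :=
  (PySem.List.dedup (cells.map (fun pc => pc.1))).map (fun t =>
    (t, PySem.Set.ofList ((cells.filter (fun pc => pc.1 == t)).map (fun pc => pc.2))))

lemma pvOfList_append_singleton {α : Type} [BEq α] (l : List α) (x : α) :
    PySem.Set.ofList (l ++ [x]) = PySem.Set.add (PySem.Set.ofList l) x := by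
  simp [PySem.Set.ofList_eq_foldl, List.foldl_append]

lemma pvDedup_append_singleton {α : Type} [BEq α] (l : List α) (x : α) :
    PySem.List.dedup (l ++ [x]) = PySem.Set.add (PySem.List.dedup l) x := by
  simp [PySem.List.dedup, pvOfList_append_singleton]

lemma pvSet_contains_iff {α : Type} [BEq α] [LawfulBEq α] (s : PySem.Set α) (x : α) :
    PySem.Set.contains s x = true ↔ x ∈ s := by
  simp [PySem.Set.contains]

-- the invariant: A's fold over any cell list, started empty, has exactly B's grouped items
lemma pvFold_items (cells : List (String × (Int × Int))) :
    (cells.foldl pvStep PySem.Dict.empty).items = pvGroup cells := by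
  induction cells using List.reverseRecOn with
  | nil => simp [pvGroup, PySem.List.dedup, PySem.Set.ofList, PySem.Dict.empty]
  | append_singleton cs pc ih =>
    set d := cs.foldl pvStep PySem.Dict.empty with hd
    have hkeys : d.keys = PySem.List.dedup (cs.map (fun pc => pc.1)) := by
      simp only [PySem.Dict.keys, ih, pvGroup, List.map_map]
      simp [Function.comp_def]
    have hnodup : d.keys.Nodup := by
      rw [hkeys]; exact PySem.List.nodup_dedup _
    have hcont : d.contains pc.1 = decide (pc.1 ∈ cs.map (fun pc => pc.1)) := by
      rw [PySem.Dict.contains_eq_decide_mem_keys, hkeys]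
      simp
    rw [List.foldl_append, List.foldl_cons, List.foldl_nil, ← hd]
    by_cases hp : pc.1 ∈ cs.map (fun pc => pc.1)
    · -- plant type already present: the set at pc.1 grows by pc.2
      have hct : d.contains pc.1 = true := by rw [hcont]; simpa using hp
      have hmem : (pc.1, PySem.Set.ofList ((cs.filter (fun qc => qc.1 == pc.1)).map (fun qc => qc.2))) ∈ d.items := by
        rw [ih, pvGroup]
        exact List.mem_map.2 ⟨pc.1, by rwa [PySem.List.mem_dedup], rfl⟩
      have hget : d.getD pc.1 PySem.Set.empty
          = PySem.Set.ofList ((cs.filter (fun qc => qc.1 == pc.1)).map (fun qc => qc.2)) :=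
        PySem.Dict.getD_of_mem_items d hmem hnodup _
      rw [pvStep]
      simp only [hct, if_true, PySem.Dict.modify, hget]
      rw [PySem.Dict.items_insert_of_contains d _ hct, ih, pvGroup, pvGroup, List.map_map]
      have hded : PySem.List.dedup ((cs ++ [pc]).map (fun qc => qc.1))
          = PySem.List.dedup (cs.map (fun qc => qc.1)) := by
        rw [List.map_append, List.map_cons, List.map_nil, pvDedup_append_singleton,
          PySem.Set.add]
        have hc : PySem.Set.contains (PySem.List.dedup (cs.map (fun qc => qc.1))) pc.1 = true := by
          rw [pvSet_contains_iff, PySem.List.mem_dedup]; exact hp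
        rw [hc]
        rfl
      rw [hded]
      apply List.map_congr_left
      intro t ht
      by_cases htp : t = pc.1
      · subst htp
        simp only [Function.comp, beq_self_eq_true, if_true]
        rw [List.filter_append]
        simp only [List.filter_cons, List.filter_nil, beq_self_eq_true, if_true]
        rw [List.map_append, List.map_cons, List.map_nil, pvOfList_append_singleton]
      · have hne : (t == pc.1) = false := by simpa using htp
        simp only [Function.comp, hne, Bool.false_eq_true, if_false]
        rw [List.filter_append]
        have hnil : List.filter (fun qc => qc.1 == t) [pc] = [] := by
          simp [Ne.symm htp]
        rw [hnil, List.append_nil]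
    · -- fresh plant type: a new singleton group is appended
      have hcf : d.contains pc.1 = false := by rw [hcont]; simpa using hp
      rw [pvStep]
      simp only [hcf, Bool.false_eq_true, if_false, PySem.Dict.modify]
      rw [PySem.Dict.getD_insert_self,
        PySem.Dict.items_insert_of_contains _ _ (PySem.Dict.contains_insert_self d pc.1 _),
        PySem.Dict.items_insert_of_not_contains d _ hcf]
      rw [List.map_append, ih, pvGroup, pvGroup, List.map_map]
      have hded : PySem.List.dedup ((cs ++ [pc]).map (fun qc => qc.1))
          = PySem.List.dedup (cs.map (fun qc => qc.1)) ++ [pc.1] := by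
        rw [List.map_append, List.map_cons, List.map_nil, pvDedup_append_singleton,
          PySem.Set.add]
        have hc : PySem.Set.contains (PySem.List.dedup (cs.map (fun qc => qc.1))) pc.1 = false := by
          rw [← Bool.not_eq_true, pvSet_contains_iff, PySem.List.mem_dedup]; exact hp
        rw [hc]
        rfl
      rw [hded, List.map_append]
      congr 1
      · apply List.map_congr_left
        intro t ht
        have htp : t ≠ pc.1 := by
          intro h; subst h
          exact hp ((PySem.List.mem_dedup _ _).1 ht)
        have hne : (t == pc.1) = false := by simpa using htp
        simp only [Function.comp, hne, Bool.false_eq_true, if_false]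
        rw [List.filter_append]
        have hnil : List.filter (fun qc => qc.1 == t) [pc] = [] := by
          simp [Ne.symm htp]
        rw [hnil, List.append_nil]
      · have hfilt : List.filter (fun qc => qc.1 == pc.1) cs = [] := by
          apply List.filter_eq_nil_iff.2
          intro qc hqc h
          exact hp (List.mem_map.2 ⟨qc, hqc, by simpa using h⟩)
        simp [List.filter_append, List.filter_cons, hfilt,
          PySem.Set.empty, PySem.Set.add, PySem.Set.ofList, PySem.Set.contains]

-- A's nested index loops equal the single fold over B's flattened cell list
lemma pvFlatten (garden : List (List String)) :
    make_plant_plot_mapping garden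
      = (((PySem.List.enumerate garden).flatMap (fun ir =>
          (PySem.List.enumerate ir.2).map (fun jp => (jp.2, (ir.1, jp.1))))).foldl
          pvStep PySem.Dict.empty).items := by
  rw [make_plant_plot_mapping, List.foldl_flatMap,
    PySem.List.enumerate_eq_map_pyRange garden [], List.foldl_map]
  have hbody : (fun (d : PySem.Dict String (PySem.Set (Int × Int))) (i : Int) =>
      List.foldl pvStep d
        ((PySem.List.enumerate (PySem.List.pyGetD garden i [])).map
          (fun jp => (jp.2, (i, jp.1)))))
      = (fun d i =>
        (PySem.List.pyRange 0 (PySem.List.len (PySem.List.pyGetD garden i []))).foldl (fun d j =>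
          let plant_type := PySem.List.pyGetD (PySem.List.pyGetD garden i []) j ""
          let d := if d.contains plant_type then d else d.insert plant_type PySem.Set.empty
          d.modify plant_type PySem.Set.empty (fun s => PySem.Set.add s (i, j))) d) := by
    funext d i
    rw [PySem.List.enumerate_eq_map_pyRange (PySem.List.pyGetD garden i []) "",
      List.map_map, List.foldl_map]
    rfl
  rw [hbody]

-- ===== VERDICT (by name: the statement is the Claim_ definition above) =====
theorem make_plant_plot_mapping_spec : Claim_equal_make_plant_plot_mapping := by
  intro garden _
  unfold Spec_make_plant_plot_mapping
  rw [pvFlatten, pvFold_items, make_plant_plot_mapping_alt, pvGroup]
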